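-- pv_equiv track=rewrite | github.com/mirkorio/learning-task | CCCS 104 -DATA-STRUCTURES/LEARNING TASK/Searching, Sorting and Hashing Techniques/CODE/Group9_Linear-search.py | policemen_thieves
-- ===== SOURCE A (Python) =====
-- def policemen_thieves(K, list1):
--
--     # Counter
--     counter = 0
--
--     # Search and count the maximum number of thieves that can be caught using for loop
--     for i in range(len(list1)):
--         if list1[i] == 'T' and 'P' in list1:
--             if i-K >= 0:
--                 front = list1[i-K:i]
--             else:
--                 front = list1[0:i]
--             if i+K+1 <= len(list1):
--                 end = list1[i+1:i+K+1]
--             else: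
--                 end = list1[i+1:len(list1)]
--             if 'P' in front:
--                 counter = counter + 1
--                 if i-K >= 0:
--                     front_index = (i-K)+front.index('P')
--                 else:
--                     front_index = front.index('P')
--                 list1[front_index] = 0
--             elif 'P' in end:
--                 counter = counter + 1
--                 end_index = i+1+end.index('P')
--                 list1[end_index] = 0
--
--     return counter
-- ===== SOURCE B (Python) =====
-- def policemen_thieves(K, list1):
--     # One pass with a pointer into the (already position-sorted) list of policeman
--     # indices: A's greedy always catches with the leftmost still-usable policeman
--     # in [i-K, i+K], and a policeman left behind the sliding window can never be
--     # used later, so a single advancing pointer replaces A's window slicing and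
--     # in-place zeroing. (Unlike A, this does not mutate list1.)
--     police = [i for i, x in enumerate(list1) if x == 'P']
--     j = 0
--     counter = 0
--     for i, x in enumerate(list1):
--         if x == 'T':
--             while j < len(police) and police[j] < i - K:
--                 j += 1
--             if j < len(police) and police[j] <= i + K:
--                 counter += 1
--                 j += 1
--     return counter
-- ===== Notes on version B (the rewrite author's own statement) =====
-- stated objective: alternative
-- what changed: Replaces A's per-thief window slicing, scanning and in-place zeroing of the list by one pass with a single advancing pointer into the list of policeman positions, exploiting that a policeman left behind the sliding window can never be matched later; B does not mutate list1.
-- intended difference: For K < 0, Python's negative slice stop in list1[i+1:i+K+1] wraps around, so A 'catches' policemen in an accidental window ahead of early thieves and returns a positive count, while B returns 0, the intended count for a negative catching distance. — e.g. on policemen_thieves(-2, ["T", "P", "X"]): A returns 1, B returns 0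
import Mathlib
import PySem

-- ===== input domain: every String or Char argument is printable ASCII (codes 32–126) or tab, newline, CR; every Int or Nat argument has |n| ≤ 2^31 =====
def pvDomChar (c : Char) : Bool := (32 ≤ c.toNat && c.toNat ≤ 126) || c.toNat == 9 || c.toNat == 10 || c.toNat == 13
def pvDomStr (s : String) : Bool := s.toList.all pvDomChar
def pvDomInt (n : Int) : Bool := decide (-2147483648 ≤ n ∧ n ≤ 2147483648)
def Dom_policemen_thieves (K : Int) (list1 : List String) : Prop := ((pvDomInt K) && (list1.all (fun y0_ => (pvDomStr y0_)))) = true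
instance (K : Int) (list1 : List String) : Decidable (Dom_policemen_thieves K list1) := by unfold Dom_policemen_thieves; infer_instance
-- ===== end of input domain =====

-- B replaces A's per-thief window slicing/scanning with in-place zeroing by one linear pass with an
-- advancing pointer into the policeman-position list (B does not mutate list1; A's in-place zeroing
-- of caught policemen is not reproduced — the equivalence proved is about the return value).

-- ===== PORT A =====
def pvAStep (K : Int) (st : List String × Int) (i : Int) : List String × Int :=
  let l := st.1
  if PySem.List.pyGetD l i "" == "T" && l.contains "P" then
    let front := if i - K ≥ 0 then PySem.List.slice l (some (i - K)) (some i)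
                 else PySem.List.slice l (some 0) (some i)
    let endw := if i + K + 1 ≤ (l.length : Int) then PySem.List.slice l (some (i + 1)) (some (i + K + 1))
                else PySem.List.slice l (some (i + 1)) (some (l.length : Int))
    if front.contains "P" then
      let frontIndex : Int := if i - K ≥ 0 then (i - K) + ((PySem.List.index? front "P").getD 0 : Nat)
                              else ((PySem.List.index? front "P").getD 0 : Nat)
      -- Python stores the int 0 at the caught position; the loop only ever compares elements
      -- with 'T'/'P', for which the string "0" is indistinguishable from the int 0.
      (PySem.List.pySetD l frontIndex "0", st.2 + 1)
    else if endw.contains "P" then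
      let endIndex : Int := i + 1 + ((PySem.List.index? endw "P").getD 0 : Nat)
      (PySem.List.pySetD l endIndex "0", st.2 + 1)
    else st
  else st

def policemen_thieves (K : Int) (list1 : List String) : Int :=
  ((PySem.List.pyRange 0 (list1.length : Int) 1).foldl (pvAStep K) (list1, 0)).2

-- ===== PORT B =====
def pvPolice (list1 : List String) : List Int :=
  ((PySem.List.enumerate list1 0).filter (fun p => p.2 == "P")).map (fun p => p.1)

-- the while loop, with explicit fuel (police.length - j strictly decreases) so that it is
-- structurally recursive; the fuel only makes the same computation total
def pvAdvanceAux (police : List Int) (bound : Int) : Nat → Nat → Nat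
  | 0, j => j
  | fuel + 1, j =>
    if h : j < police.length then
      if police[j] < bound then pvAdvanceAux police bound fuel (j + 1) else j
    else j

def pvAdvance (police : List Int) (bound : Int) (j : Nat) : Nat :=
  pvAdvanceAux police bound (police.length - j) j

def pvBStep (K : Int) (police : List Int) (st : Nat × Int) (ix : Int × String) : Nat × Int :=
  if ix.2 == "T" then
    let j := pvAdvance police (ix.1 - K) st.1
    if h : j < police.length then
      if police[j] ≤ ix.1 + K then (j + 1, st.2 + 1) else (j, st.2)
    else (j, st.2)
  else st

def policemen_thieves_alt (K : Int) (list1 : List String) : Int :=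
  ((PySem.List.enumerate list1 0).foldl (pvBStep K (pvPolice list1)) (0, 0)).2

-- ===== PRECONDITION & SPEC =====
-- For K < 0, Python's negative slice stop in list1[i+1:i+K+1] wraps around, so A 'catches' policemen
-- in an accidental window ahead of early thieves and returns a positive count, while B returns 0,
-- the intended count for a negative catching distance.
def D_policemen_thieves (K : Int) (list1 : List String) : Prop :=
  K < 0 ∧ ∃ i : Fin list1.length, ∃ p : Fin list1.length,
    list1[i] = "T" ∧ list1[p] = "P" ∧ ((i : Nat) : Int) < -K - 1 ∧ (i : Nat) < (p : Nat) ∧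
    ((p : Nat) : Int) < (list1.length : Int) + (i : Nat) + K + 1
instance (K : Int) (list1 : List String) : Decidable (D_policemen_thieves K list1) := by
  unfold D_policemen_thieves; infer_instance

def Spec_policemen_thieves (K : Int) (list1 : List String) (out : Int) : Prop :=
  ¬ D_policemen_thieves K list1 → out = policemen_thieves_alt K list1
instance (K : Int) (list1 : List String) (out : Int) : Decidable (Spec_policemen_thieves K list1 out) := by
  unfold Spec_policemen_thieves; infer_instance

def pvDiffWitness_policemen_thieves : Int × List String := (-2, ["T", "P", "X"])
def pvDiffWitnessOut_policemen_thieves : Int × Int := (1, 0)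

-- ===== CLAIM (what is proved, stated in full; the proofs are below) =====
def Claim_unchanged_policemen_thieves : Prop := ∀ (K : Int) (list1 : List String), Dom_policemen_thieves K list1 → Spec_policemen_thieves K list1 (policemen_thieves K list1)
def Claim_changed_policemen_thieves : Prop := Dom_policemen_thieves (pvDiffWitness_policemen_thieves.1) (pvDiffWitness_policemen_thieves.2) ∧ D_policemen_thieves (pvDiffWitness_policemen_thieves.1) (pvDiffWitness_policemen_thieves.2) ∧ policemen_thieves (pvDiffWitness_policemen_thieves.1) (pvDiffWitness_policemen_thieves.2) = pvDiffWitnessOut_policemen_thieves.1 ∧ policemen_thieves_alt (pvDiffWitness_policemen_thieves.1) (pvDiffWitness_policemen_thieves.2) = pvDiffWitnessOut_policemen_thieves.2 ∧ pvDiffWitnessOut_policemen_thieves.1 ≠ pvDiffWitnessOut_policemen_thieves.2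
def Claim_exact_policemen_thieves : Prop := ∀ (K : Int) (list1 : List String), Dom_policemen_thieves K list1 → D_policemen_thieves K list1 → policemen_thieves K list1 ≠ policemen_thieves_alt K list1

-- ===== LEMMAS AND PROOFS =====

-- The loop invariant tying A's mutated list to B's pointer: after the first i thief positions,
-- A's list l masks the original L exactly at caught-policeman positions; B's pointer j has passed
-- exactly the policemen that are caught or sit left of the sliding window.
def pvInv (K : Int) (L : List String) (i : Nat) (l : List String) (j : Nat) : Prop :=
  l.length = L.length ∧
  (∀ q : Nat, q < L.length → l.getD q "" = L.getD q "" ∨ (l.getD q "" = "0" ∧ L.getD q "" = "P")) ∧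
  j ≤ (pvPolice L).length ∧
  (∀ m : Nat, m < (pvPolice L).length → j ≤ m → l.getD ((pvPolice L).getD m 0).toNat "" = "P") ∧
  (∀ m : Nat, m < (pvPolice L).length → m < j → l.getD ((pvPolice L).getD m 0).toNat "" = "0" ∨ (pvPolice L).getD m 0 < (i : Int) - K)

lemma pv_mem_enumerate {α : Type} (x : Int) (y : α) :
    ∀ (L : List α) (s : Int), (x, y) ∈ PySem.List.enumerate L s ↔
      ∃ k : Nat, ∃ h : k < L.length, x = s + k ∧ y = L[k] := by
  intro L
  induction L with
  | nil => intro s; simp [PySem.List.enumerate_nil]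
  | cons a t ih =>
    intro s
    rw [PySem.List.enumerate_cons]
    constructor
    · intro h
      rcases List.mem_cons.1 h with h | h
      · exact ⟨0, by simp, by simpa [Prod.ext_iff] using h⟩
      · rcases (ih (s + 1)).1 h with ⟨k, hk, hx, hy⟩
        exact ⟨k + 1, by simpa using hk, by push_cast at hx ⊢; omega, by simpa using hy⟩
    · rintro ⟨k, hk, hx, hy⟩
      cases k with
      | zero =>
        have h1 : x = s := by push_cast at hx; omega
        have h2 : y = a := by simpa using hy
        subst h1; subst h2
        exact List.mem_cons.2 (Or.inl rfl)
      | succ k =>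
        right
        exact (ih (s + 1)).2 ⟨k, by simpa using hk, by push_cast at hx ⊢; omega, by simpa using hy⟩

lemma pvPolice_mem (L : List String) (x : Int) :
    x ∈ pvPolice L ↔ ∃ k : Nat, ∃ h : k < L.length, x = (k : Int) ∧ L[k] = "P" := by
  unfold pvPolice
  simp only [List.mem_map, List.mem_filter]
  constructor
  · rintro ⟨⟨a, b⟩, ⟨hmem, hP⟩, rfl⟩
    rcases (pv_mem_enumerate a b L 0).1 hmem with ⟨k, hk, hx, hy⟩
    exact ⟨k, hk, by omega, by simp_all⟩
  · rintro ⟨k, hk, rfl, hP⟩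
    exact ⟨((k : Int), L[k]), ⟨(pv_mem_enumerate _ _ L 0).2 ⟨k, hk, by omega, rfl⟩, by simp [hP]⟩, rfl⟩

lemma pvPolice_sorted (L : List String) : (pvPolice L).Pairwise (· < ·) := by
  unfold pvPolice
  have h1 : ((PySem.List.enumerate L 0).filter (fun p => p.2 == "P")).Sublist (PySem.List.enumerate L 0) :=
    List.filter_sublist
  have h2 := (h1.map (fun p => p.1))
  rw [PySem.List.map_fst_enumerate] at h2
  exact (PySem.List.pairwise_lt_pyRange_one 0 (0 + L.length)).sublist h2

lemma pvPolice_elem (L : List String) (m : Nat) (hm : m < (pvPolice L).length) :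
    0 ≤ (pvPolice L).getD m 0 ∧ ((pvPolice L).getD m 0).toNat < L.length ∧
      L.getD ((pvPolice L).getD m 0).toNat "" = "P" := by
  rw [List.getD_eq_getElem _ _ hm]
  have hmem : (pvPolice L)[m] ∈ pvPolice L := List.getElem_mem hm
  rcases (pvPolice_mem L _).1 hmem with ⟨k, hk, hx, hP⟩
  refine ⟨by omega, by omega, ?_⟩
  have : ((pvPolice L)[m]).toNat = k := by omega
  rw [this, List.getD_eq_getElem _ _ hk]; exact hP

lemma pvPolice_mono (L : List String) (m m' : Nat) (hm' : m' < (pvPolice L).length) (h : m < m') :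
    (pvPolice L).getD m 0 < (pvPolice L).getD m' 0 := by
  rw [List.getD_eq_getElem _ _ (lt_trans h hm'), List.getD_eq_getElem _ _ hm']
  exact (List.pairwise_iff_getElem.1 (pvPolice_sorted L)) m m' (lt_trans h hm') hm' h

lemma pvPolice_complete (L : List String) (p : Nat) (hp : p < L.length) (hP : L.getD p "" = "P") :
    ∃ m : Nat, ∃ _hm : m < (pvPolice L).length, (pvPolice L).getD m 0 = (p : Int) := by
  have hmem : ((p : Int)) ∈ pvPolice L := by
    refine (pvPolice_mem L _).2 ⟨p, hp, rfl, ?_⟩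
    rw [List.getD_eq_getElem _ _ hp] at hP; exact hP
  rcases List.mem_iff_getElem.1 hmem with ⟨m, hm, he⟩
  exact ⟨m, hm, by rw [List.getD_eq_getElem _ _ hm]; exact he⟩

lemma pvAdvanceAux_spec (ps : List Int) (b : Int) :
    ∀ (fuel j : Nat), ps.length - j ≤ fuel → j ≤ ps.length →
      j ≤ pvAdvanceAux ps b fuel j ∧ pvAdvanceAux ps b fuel j ≤ ps.length ∧
      (∀ m : Nat, j ≤ m → m < pvAdvanceAux ps b fuel j → ps.getD m 0 < b) ∧
      (pvAdvanceAux ps b fuel j < ps.length → ¬ ps.getD (pvAdvanceAux ps b fuel j) 0 < b) := by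
  intro fuel
  induction fuel with
  | zero =>
    intro j h1 h2
    have hj : j = ps.length := by omega
    subst hj
    rw [pvAdvanceAux]
    exact ⟨le_refl _, le_refl _, fun m hm1 hm2 => absurd hm2 (by omega),
      fun h => absurd h (by omega)⟩
  | succ fuel ih =>
    intro j h1 h2
    rw [pvAdvanceAux]
    by_cases hj : j < ps.length
    · rw [dif_pos hj]
      by_cases hb : ps[j] < b
      · rw [if_pos hb]
        obtain ⟨ha1, ha2, ha3, ha4⟩ := ih (j + 1) (by omega) (by omega)
        refine ⟨by omega, ha2, ?_, ha4⟩
        intro m hm1 hm2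
        by_cases hmj : m = j
        · subst hmj; rw [List.getD_eq_getElem _ _ hj]; exact hb
        · exact ha3 m (by omega) hm2
      · rw [if_neg hb]
        refine ⟨le_refl _, by omega, fun m hm1 hm2 => absurd hm2 (by omega), ?_⟩
        intro _; rw [List.getD_eq_getElem _ _ hj]; exact hb
    · rw [dif_neg hj]
      exact ⟨le_refl _, by omega, fun m hm1 hm2 => absurd hm2 (by omega),
        fun h => absurd h hj⟩

lemma pvAdvance_spec (ps : List Int) (b : Int) (j : Nat) (h2 : j ≤ ps.length) :
    j ≤ pvAdvance ps b j ∧ pvAdvance ps b j ≤ ps.length ∧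
      (∀ m : Nat, j ≤ m → m < pvAdvance ps b j → ps.getD m 0 < b) ∧
      (pvAdvance ps b j < ps.length → ¬ ps.getD (pvAdvance ps b j) 0 < b) :=
  pvAdvanceAux_spec ps b (ps.length - j) j (le_refl _) h2

lemma pv_clampIdx_cast (n : Nat) (b : Int) :
    ((PySem.List.clampIdx n b : Nat) : Int) = max 0 (min (if b < 0 then (n : Int) + b else b) n) := by
  simp only [PySem.List.clampIdx]
  split_ifs <;> omega

lemma pv_slice_eq (l : List String) (a b : Int) (ha : 0 ≤ a) :
    PySem.List.slice l (some a) (some b) =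
      (l.drop a.toNat).take (PySem.List.clampIdx l.length b - a.toNat) := by
  simp only [PySem.List.slice]
  have : PySem.List.clampIdx l.length a = min a.toNat l.length := by
    simp only [PySem.List.clampIdx]; split_ifs <;> omega
  rw [this]
  by_cases h : a.toNat ≤ l.length
  · rw [min_eq_left h]
  · have h1 : l.drop (min a.toNat l.length) = [] := by
      apply List.drop_eq_nil_of_le; omega
    have h2 : l.drop a.toNat = [] := by
      apply List.drop_eq_nil_of_le; omega
    rw [h1, h2, List.take_nil, List.take_nil]

lemma pv_mem_take_drop (l : List String) (a t : Nat) (v : String) :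
    ((l.drop a).take t).contains v = true ↔
      ∃ q : Nat, q < l.length ∧ a ≤ q ∧ q < a + t ∧ l.getD q "" = v := by
  rw [List.contains_iff_mem, List.mem_iff_getElem]
  constructor
  · rintro ⟨r, hr, he⟩
    have hr1 : r < t := by simpa using lt_of_lt_of_le hr (by simp)
    have hr2 : a + r < l.length := by
      have := hr; simp [List.length_take, List.length_drop] at this; omega
    refine ⟨a + r, hr2, by omega, by omega, ?_⟩
    rw [List.getD_eq_getElem _ _ hr2]
    rw [List.getElem_take, List.getElem_drop] at he
    exact he
  · rintro ⟨q, hq, hq1, hq2, he⟩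
    have hr : q - a < ((l.drop a).take t).length := by
      simp [List.length_take, List.length_drop]; omega
    refine ⟨q - a, hr, ?_⟩
    rw [List.getElem_take, List.getElem_drop]
    rw [List.getD_eq_getElem _ _ hq] at he
    have : a + (q - a) = q := by omega
    simp_rw [this]; exact he

lemma pv_index_take_drop (l : List String) (a t : Nat) (v : String) (r : Nat)
    (h : PySem.List.index? ((l.drop a).take t) v = some r) :
    a + r < l.length ∧ r < t ∧ l.getD (a + r) "" = v ∧
      ∀ q : Nat, a ≤ q → q < a + r → l.getD q "" ≠ v := by
  obtain ⟨hk, he, hfirst⟩ := PySem.List.getElem_of_index?_eq_some h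
  have hr1 : r < t := by simpa using lt_of_lt_of_le hk (by simp)
  have hr2 : a + r < l.length := by
    have := hk; simp [List.length_take, List.length_drop] at this; omega
  rw [List.getElem_take, List.getElem_drop] at he
  refine ⟨hr2, hr1, by rw [List.getD_eq_getElem _ _ hr2]; exact he, ?_⟩
  intro q hq1 hq2 hc
  have hqr : q - a < r := by omega
  have hql : q < l.length := by omega
  have hq' : q - a < ((l.drop a).take t).length := by
    simp [List.length_take, List.length_drop]; omega
  apply hfirst (q - a) hqr
  rw [List.getElem_take, List.getElem_drop]
  rw [List.getD_eq_getElem _ _ hql] at hc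
  have : a + (q - a) = q := by omega
  simp_rw [this]; exact hc

-- contains on the whole list, via the invariant: some un-passed policeman exists iff "P" ∈ l
lemma pv_contains_getD (l : List String) (v : String) :
    l.contains v = true ↔ ∃ q : Nat, q < l.length ∧ l.getD q "" = v := by
  rw [List.contains_iff_mem, List.mem_iff_getElem]
  constructor
  · rintro ⟨q, hq, he⟩; exact ⟨q, hq, by rw [List.getD_eq_getElem _ _ hq]; exact he⟩
  · rintro ⟨q, hq, he⟩; exact ⟨q, hq, by rw [List.getD_eq_getElem _ _ hq] at he; exact he⟩

lemma pv_getD_set (l : List String) (f q : Nat) (v : String) (hq : q < l.length) :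
    (l.set f v).getD q "" = if f = q then v else l.getD q "" := by
  rw [List.getD_eq_getElem _ _ (by simpa using hq), List.getElem_set]
  split_ifs with h
  · rfl
  · exact (List.getD_eq_getElem _ _ hq).symm

-- consuming the first "P" of the window around thief i: B's pointer lands exactly on it
lemma pv_catch (K : Int) (L : List String) (hK : 0 ≤ K) (i : Nat) (_hi : i < L.length)
    (l : List String) (j : Nat) (hInv : pvInv K L i l j) (hiT : l.getD i "" = "T")
    (f : Nat) (hfl : f < l.length) (hfP : l.getD f "" = "P")
    (hwlo : max 0 ((i : Int) - K) ≤ (f : Int))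
    (hwhi : (f : Int) < min ((i : Int) + K + 1) (L.length : Int)) (hfne : f ≠ i)
    (hfirst : ∀ q : Nat, q < l.length → max 0 ((i : Int) - K) ≤ (q : Int) →
      (q : Int) < min ((i : Int) + K + 1) (L.length : Int) → q ≠ i → q < f → l.getD q "" ≠ "P") :
    pvAdvance (pvPolice L) ((i : Int) - K) j < (pvPolice L).length ∧
    (pvPolice L).getD (pvAdvance (pvPolice L) ((i : Int) - K) j) 0 = (f : Int) ∧
    pvInv K L (i + 1) (l.set f "0") (pvAdvance (pvPolice L) ((i : Int) - K) j + 1) := by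
  obtain ⟨hlen, hmask, hjlen, hsuf, hpre⟩ := hInv
  obtain ⟨hj1, hj2, hj3, hj4⟩ := pvAdvance_spec (pvPolice L) ((i : Int) - K) j hjlen
  have hfn : f < L.length := by omega
  have hLfP : L.getD f "" = "P" := by
    rcases hmask f hfn with h | ⟨h1, _⟩
    · rw [← h]; exact hfP
    · rw [h1] at hfP; exact absurd hfP (by decide)
  obtain ⟨m, hm, hme⟩ := pvPolice_complete L f hfn hLfP
  -- m is at or beyond j
  have hjm : j ≤ m := by
    by_contra hc
    rcases hpre m hm (by omega) with h | h
    · rw [hme, Int.toNat_natCast, hfP] at h; exact absurd h (by decide)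
    · rw [hme] at h; omega
  -- m is at or beyond the advanced pointer
  have hj'm : pvAdvance (pvPolice L) ((i : Int) - K) j ≤ m := by
    by_contra hc
    have := hj3 m hjm (by omega)
    rw [hme] at this; omega
  have hj'lt : pvAdvance (pvPolice L) ((i : Int) - K) j < (pvPolice L).length := by omega
  -- and in fact equal to m: anything strictly between would be an earlier "P" in the window
  have hj'm' : pvAdvance (pvPolice L) ((i : Int) - K) j = m := by
    by_contra hc
    have hlt : pvAdvance (pvPolice L) ((i : Int) - K) j < m := by omega
    obtain ⟨hge0, hplt, _⟩ := pvPolice_elem L _ hj'lt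
    have hmono := pvPolice_mono L _ m hm hlt
    rw [hme] at hmono
    have hstop := hj4 hj'lt
    have hPat : l.getD ((pvPolice L).getD (pvAdvance (pvPolice L) ((i : Int) - K) j) 0).toNat "" = "P" :=
      hsuf _ hj'lt hj1
    have hqne : ((pvPolice L).getD (pvAdvance (pvPolice L) ((i : Int) - K) j) 0).toNat ≠ i := by
      intro he
      rw [he] at hPat; rw [hiT] at hPat; exact absurd hPat (by decide)
    exact hfirst ((pvPolice L).getD (pvAdvance (pvPolice L) ((i : Int) - K) j) 0).toNat
      (by omega) (by omega) (by omega) hqne (by omega) hPat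
  refine ⟨hj'lt, by rw [hj'm']; exact hme, ?_⟩
  refine ⟨by rw [List.length_set]; exact hlen, ?_, by omega, ?_, ?_⟩
  · intro q hq
    rw [pv_getD_set l f q "0" (by omega)]
    split_ifs with he
    · right; exact ⟨rfl, by rw [← he]; exact hLfP⟩
    · exact hmask q hq
  · intro m' hm' hjm'
    obtain ⟨hge0', hplt', _⟩ := pvPolice_elem L m' hm'
    rw [pv_getD_set l f _ "0" (by omega)]
    have hmono := pvPolice_mono L _ m' hm' (by omega : pvAdvance (pvPolice L) ((i : Int) - K) j < m')
    rw [hj'm', hme] at hmono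
    rw [if_neg (by omega)]
    exact hsuf m' hm' (by omega)
  · intro m' hm' hm'j
    obtain ⟨hge0', hplt', _⟩ := pvPolice_elem L m' hm'
    by_cases hmj' : m' = pvAdvance (pvPolice L) ((i : Int) - K) j
    · left
      rw [hmj', hj'm', hme, Int.toNat_natCast]
      rw [pv_getD_set l f f "0" (by omega)]
      simp
    · by_cases hm'lt : m' < j
      · rcases hpre m' hm' hm'lt with h | h
        · left
          rw [pv_getD_set l f _ "0" (by omega)]
          have hmono := pvPolice_mono L m' _ hj'lt (by omega)
          rw [hj'm', hme] at hmono
          rw [if_neg (by omega)]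
          exact h
        · right; push_cast; omega
      · have := hj3 m' (by omega) (by omega)
        right; push_cast; omega

-- no "P" in the window around thief i: B's pointer finds nothing usable either
lemma pv_nocatch (K : Int) (L : List String) (hK : 0 ≤ K) (i : Nat) (_hi : i < L.length)
    (l : List String) (j : Nat) (hInv : pvInv K L i l j) (hiT : l.getD i "" = "T")
    (hnone : ∀ q : Nat, q < l.length → max 0 ((i : Int) - K) ≤ (q : Int) →
      (q : Int) < min ((i : Int) + K + 1) (L.length : Int) → q ≠ i → l.getD q "" ≠ "P") :
    (∀ _h : pvAdvance (pvPolice L) ((i : Int) - K) j < (pvPolice L).length,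
      ¬ (pvPolice L).getD (pvAdvance (pvPolice L) ((i : Int) - K) j) 0 ≤ (i : Int) + K) ∧
    pvInv K L (i + 1) l (pvAdvance (pvPolice L) ((i : Int) - K) j) := by
  obtain ⟨hlen, hmask, hjlen, hsuf, hpre⟩ := hInv
  obtain ⟨hj1, hj2, hj3, hj4⟩ := pvAdvance_spec (pvPolice L) ((i : Int) - K) j hjlen
  constructor
  · intro hj'lt hle
    obtain ⟨hge0, hplt, _⟩ := pvPolice_elem L _ hj'lt
    have hstop := hj4 hj'lt
    have hPat : l.getD ((pvPolice L).getD (pvAdvance (pvPolice L) ((i : Int) - K) j) 0).toNat "" = "P" :=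
      hsuf _ hj'lt hj1
    have hqne : ((pvPolice L).getD (pvAdvance (pvPolice L) ((i : Int) - K) j) 0).toNat ≠ i := by
      intro he
      rw [he, hiT] at hPat; exact absurd hPat (by decide)
    exact hnone _ (by omega) (by omega) (by omega) hqne hPat
  · refine ⟨hlen, hmask, hj2, fun m hm hjm => hsuf m hm (by omega), ?_⟩
    intro m hm hmj
    by_cases hmlt : m < j
    · rcases hpre m hm hmlt with h | h
      · exact Or.inl h
      · right; push_cast; omega
    · have := hj3 m (by omega) (by omega)
      right; push_cast; omega

lemma pv_step (K : Int) (L : List String) (hK : 0 ≤ K) (i : Nat) (hi : i < L.length)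
    (l : List String) (j : Nat) (c : Int) (hInv : pvInv K L i l j) :
    (pvAStep K (l, c) (i : Int)).2 = (pvBStep K (pvPolice L) (j, c) ((i : Int), L[i])).2 ∧
      pvInv K L (i + 1) (pvAStep K (l, c) (i : Int)).1 (pvBStep K (pvPolice L) (j, c) ((i : Int), L[i])).1 := by
  obtain ⟨hlen, hmask, hjlen, hsuf, hpre⟩ := hInv
  have hInv' : pvInv K L i l j := ⟨hlen, hmask, hjlen, hsuf, hpre⟩
  have hLi : L.getD i "" = L[i] := List.getD_eq_getElem _ _ hi
  by_cases hxT : L[i] = "T"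
  case neg =>
    have hB : pvBStep K (pvPolice L) (j, c) ((i : Int), L[i]) = (j, c) := by
      simp [pvBStep, hxT]
    have hgd : l.getD i "" ≠ "T" := by
      rcases hmask i hi with h | ⟨h1, h2⟩
      · rw [h, hLi]; exact hxT
      · rw [h1]; decide
    have hA : pvAStep K (l, c) (i : Int) = (l, c) := by
      simp only [pvAStep]
      rw [if_neg (by
        simp only [Bool.and_eq_true, beq_iff_eq, PySem.List.pyGetD_natCast, List.contains_iff_mem]
        rintro ⟨h1, _⟩
        exact hgd h1)]
    rw [hA, hB]
    refine ⟨rfl, hlen, hmask, hjlen, hsuf, ?_⟩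
    intro m hm hmj
    rcases hpre m hm hmj with h | h
    · exact Or.inl h
    · right; push_cast at h ⊢; omega
  case pos =>
    have hlT : l.getD i "" = "T" := by
      rcases hmask i hi with h | ⟨h1, h2⟩
      · rw [h, hLi, hxT]
      · rw [hLi, hxT] at h2; exact absurd h2 (by decide)
    have hBeq : pvBStep K (pvPolice L) (j, c) ((i : Int), L[i]) =
        (if _h : pvAdvance (pvPolice L) ((i : Int) - K) j < (pvPolice L).length then
          (if (pvPolice L)[pvAdvance (pvPolice L) ((i : Int) - K) j] ≤ (i : Int) + K
            then (pvAdvance (pvPolice L) ((i : Int) - K) j + 1, c + 1)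
            else (pvAdvance (pvPolice L) ((i : Int) - K) j, c))
        else (pvAdvance (pvPolice L) ((i : Int) - K) j, c)) := by
      simp [pvBStep, hxT]
    by_cases hP : l.contains "P" = true
    case neg =>
      have hP' : l.contains "P" = false := by revert hP; cases l.contains "P" <;> simp
      have hjeq : j = (pvPolice L).length := by
        by_contra hne
        have hjlt : j < (pvPolice L).length := by omega
        have h1 := hsuf j hjlt (le_refl _)
        obtain ⟨hge0, hplt, _⟩ := pvPolice_elem L j hjlt
        rw [(pv_contains_getD l "P").2 ⟨_, by omega, h1⟩] at hP'
        exact absurd hP' (by decide)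
      obtain ⟨hj1, hj2, hj3, hj4⟩ := pvAdvance_spec (pvPolice L) ((i : Int) - K) j hjlen
      have hj'eq : pvAdvance (pvPolice L) ((i : Int) - K) j = j := by omega
      have hB : pvBStep K (pvPolice L) (j, c) ((i : Int), L[i]) = (j, c) := by
        rw [hBeq, dif_neg (by omega), hj'eq]
      have hgP : ¬ ("P" : String) ∈ l := by
        rw [← List.contains_iff_mem, hP']; simp
      have hA : pvAStep K (l, c) (i : Int) = (l, c) := by
        simp only [pvAStep]
        rw [if_neg (by
          simp only [Bool.and_eq_true, beq_iff_eq, PySem.List.pyGetD_natCast, List.contains_iff_mem]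
          rintro ⟨_, h2⟩
          exact hgP h2)]
      rw [hA, hB]
      refine ⟨rfl, hlen, hmask, hjlen, hsuf, ?_⟩
      intro m hm hmj
      rcases hpre m hm hmj with h | h
      · exact Or.inl h
      · right; push_cast at h ⊢; omega
    case pos =>
      have hguard : (PySem.List.pyGetD l ((i : Int)) "" == "T" && l.contains "P") = true := by
        rw [PySem.List.pyGetD_natCast, hlT, hP]; rfl
      -- canonical windows
      have hclampi : PySem.List.clampIdx l.length ((i : Int)) = i := by
        simp only [PySem.List.clampIdx]
        split_ifs <;> omega
      have haN : ((max 0 ((i : Int) - K)).toNat : Int) = max 0 ((i : Int) - K) := by omega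
      have haNle : (max 0 ((i : Int) - K)).toNat ≤ i := by omega
      have hfront : (if (i : Int) - K ≥ 0 then PySem.List.slice l (some ((i : Int) - K)) (some (i : Int))
            else PySem.List.slice l (some 0) (some (i : Int))) =
          (l.drop (max 0 ((i : Int) - K)).toNat).take (i - (max 0 ((i : Int) - K)).toNat) := by
        split_ifs with hik
        · have e1 : ((i : Int) - K).toNat = (max 0 ((i : Int) - K)).toNat := by omega
          rw [pv_slice_eq l _ _ hik, hclampi, e1]
        · have e1 : ((0 : Int)).toNat = (max 0 ((i : Int) - K)).toNat := by omega
          rw [pv_slice_eq l 0 _ (le_refl 0), hclampi, e1]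
      have heNi : ((min ((i : Int) + K + 1) (l.length : Int)).toNat : Int) =
          min ((i : Int) + K + 1) (l.length : Int) := by omega
      have hend : (if (i : Int) + K + 1 ≤ (l.length : Int) then
            PySem.List.slice l (some ((i : Int) + 1)) (some ((i : Int) + K + 1))
          else PySem.List.slice l (some ((i : Int) + 1)) (some (l.length : Int))) =
          (l.drop (i + 1)).take ((min ((i : Int) + K + 1) (l.length : Int)).toNat - (i + 1)) := by
        have hi1 : ((i : Int) + 1).toNat = i + 1 := by omega
        split_ifs with hbc
        · have e2 : PySem.List.clampIdx l.length ((i : Int) + K + 1) =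
              (min ((i : Int) + K + 1) (l.length : Int)).toNat := by
            simp only [PySem.List.clampIdx]
            split_ifs <;> omega
          rw [pv_slice_eq l _ _ (by omega), hi1, e2]
        · have e2 : PySem.List.clampIdx l.length ((l.length : Int)) =
              (min ((i : Int) + K + 1) (l.length : Int)).toNat := by
            simp only [PySem.List.clampIdx]
            split_ifs <;> omega
          rw [pv_slice_eq l _ _ (by omega), hi1, e2]
      have hAeq : pvAStep K (l, c) (i : Int) =
          (if ((l.drop (max 0 ((i : Int) - K)).toNat).take (i - (max 0 ((i : Int) - K)).toNat)).contains "P" then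
            (PySem.List.pySetD l
              (if (i : Int) - K ≥ 0 then
                ((i : Int) - K) + ((PySem.List.index? ((l.drop (max 0 ((i : Int) - K)).toNat).take (i - (max 0 ((i : Int) - K)).toNat)) "P").getD 0 : Nat)
              else ((PySem.List.index? ((l.drop (max 0 ((i : Int) - K)).toNat).take (i - (max 0 ((i : Int) - K)).toNat)) "P").getD 0 : Nat)) "0", c + 1)
          else if ((l.drop (i + 1)).take ((min ((i : Int) + K + 1) (l.length : Int)).toNat - (i + 1))).contains "P" then
            (PySem.List.pySetD l
              ((i : Int) + 1 + ((PySem.List.index? ((l.drop (i + 1)).take ((min ((i : Int) + K + 1) (l.length : Int)).toNat - (i + 1))) "P").getD 0 : Nat)) "0", c + 1)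
          else (l, c)) := by
        simp only [pvAStep, hguard, if_true]
        rw [hfront, hend]
      by_cases hfP : ((l.drop (max 0 ((i : Int) - K)).toNat).take (i - (max 0 ((i : Int) - K)).toNat)).contains "P" = true
      case pos =>
        -- front catch
        obtain ⟨r, hr⟩ := Option.isSome_iff_exists.1 ((PySem.List.index?_isSome_iff _ _).2
          (List.contains_iff_mem.1 hfP))
        obtain ⟨hfl, hrt, hfPv, hfirst0⟩ := pv_index_take_drop l _ _ "P" r hr
        have hA : pvAStep K (l, c) (i : Int) =
            (l.set ((max 0 ((i : Int) - K)).toNat + r) "0", c + 1) := by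
          rw [hAeq, if_pos hfP, hr]
          simp only [Option.getD_some]
          congr 1
          split_ifs with hik
          · have e3 : ((i : Int) - K + (r : Int)).toNat = (max 0 ((i : Int) - K)).toNat + r := by
              omega
            rw [PySem.List.pySetD_of_nonneg _ _ (by omega), e3]
          · have e3 : ((r : Nat) : Int).toNat = (max 0 ((i : Int) - K)).toNat + r := by
              omega
            rw [PySem.List.pySetD_of_nonneg _ _ (by omega), e3]
        have hcatch := pv_catch K L hK i hi l j hInv' hlT ((max 0 ((i : Int) - K)).toNat + r)
          hfl hfPv (by push_cast; omega) (by push_cast; omega) (by omega)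
          (by
            intro q hq hq1 hq2 hq3 hq4
            exact hfirst0 q (by omega) (by omega))
        obtain ⟨hj'lt, hj'val, hInvNew⟩ := hcatch
        have hB : pvBStep K (pvPolice L) (j, c) ((i : Int), L[i]) =
            (pvAdvance (pvPolice L) ((i : Int) - K) j + 1, c + 1) := by
          rw [hBeq, dif_pos hj'lt, if_pos]
          rw [← List.getD_eq_getElem _ _ hj'lt, hj'val]
          push_cast; omega
        rw [hA, hB]
        exact ⟨rfl, hInvNew⟩
      case neg =>
        have hfP' : ((l.drop (max 0 ((i : Int) - K)).toNat).take (i - (max 0 ((i : Int) - K)).toNat)).contains "P" = false := by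
          revert hfP; cases ((l.drop (max 0 ((i : Int) - K)).toNat).take (i - (max 0 ((i : Int) - K)).toNat)).contains "P" <;> simp
        have hfrontNone : ∀ q : Nat, q < l.length → max 0 ((i : Int) - K) ≤ (q : Int) → (q : Int) < (i : Int) →
            l.getD q "" ≠ "P" := by
          intro q hq hq1 hq2 hc
          have : ((l.drop (max 0 ((i : Int) - K)).toNat).take (i - (max 0 ((i : Int) - K)).toNat)).contains "P" = true :=
            (pv_mem_take_drop l _ _ "P").2 ⟨q, hq, by omega, by omega, hc⟩
          rw [this] at hfP'; exact absurd hfP' (by decide)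
        by_cases heP : ((l.drop (i + 1)).take ((min ((i : Int) + K + 1) (l.length : Int)).toNat - (i + 1))).contains "P" = true
        case pos =>
          obtain ⟨r, hr⟩ := Option.isSome_iff_exists.1 ((PySem.List.index?_isSome_iff _ _).2
            (List.contains_iff_mem.1 heP))
          obtain ⟨hel, hrt, hePv, hfirst0⟩ := pv_index_take_drop l _ _ "P" r hr
          have hA : pvAStep K (l, c) (i : Int) = (l.set (i + 1 + r) "0", c + 1) := by
            rw [hAeq, if_neg (by rw [hfP']; simp), if_pos heP, hr]
            simp only [Option.getD_some]
            congr 1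
            have e3 : ((i : Int) + 1 + (r : Int)).toNat = i + 1 + r := by omega
            rw [PySem.List.pySetD_of_nonneg _ _ (by omega), e3]
          have hcatch := pv_catch K L hK i hi l j hInv' hlT (i + 1 + r)
            hel hePv (by push_cast; omega) (by push_cast at hrt ⊢; omega) (by omega)
            (by
              intro q hq hq1 hq2 hq3 hq4
              by_cases hqi : (q : Int) < (i : Int)
              · exact hfrontNone q hq hq1 hqi
              · have hq5 : i + 1 ≤ q := by omega
                exact hfirst0 q hq5 (by omega))
          obtain ⟨hj'lt, hj'val, hInvNew⟩ := hcatch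
          have hB : pvBStep K (pvPolice L) (j, c) ((i : Int), L[i]) =
              (pvAdvance (pvPolice L) ((i : Int) - K) j + 1, c + 1) := by
            rw [hBeq, dif_pos hj'lt, if_pos]
            rw [← List.getD_eq_getElem _ _ hj'lt, hj'val]
            push_cast at hrt ⊢; omega
          rw [hA, hB]
          exact ⟨rfl, hInvNew⟩
        case neg =>
          have heP' : ((l.drop (i + 1)).take ((min ((i : Int) + K + 1) (l.length : Int)).toNat - (i + 1))).contains "P" = false := by
            revert heP; cases ((l.drop (i + 1)).take ((min ((i : Int) + K + 1) (l.length : Int)).toNat - (i + 1))).contains "P" <;> simp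
          have hA : pvAStep K (l, c) (i : Int) = (l, c) := by
            rw [hAeq, if_neg (by rw [hfP']; simp), if_neg (by rw [heP']; simp)]
          have hnone : ∀ q : Nat, q < l.length → max 0 ((i : Int) - K) ≤ (q : Int) →
              (q : Int) < min ((i : Int) + K + 1) (L.length : Int) → q ≠ i → l.getD q "" ≠ "P" := by
            intro q hq hq1 hq2 hq3 hc
            by_cases hqi : (q : Int) < (i : Int)
            · exact hfrontNone q hq hq1 hqi hc
            · have hq5 : i + 1 ≤ q := by omega
              have : ((l.drop (i + 1)).take ((min ((i : Int) + K + 1) (l.length : Int)).toNat - (i + 1))).contains "P" = true :=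
                (pv_mem_take_drop l _ _ "P").2 ⟨q, hq, hq5, by omega, hc⟩
              rw [this] at heP'; exact absurd heP' (by decide)
          obtain ⟨hnc, hInvNew⟩ := pv_nocatch K L hK i hi l j hInv' hlT hnone
          have hB : pvBStep K (pvPolice L) (j, c) ((i : Int), L[i]) =
              (pvAdvance (pvPolice L) ((i : Int) - K) j, c) := by
            rw [hBeq]
            by_cases hj'lt : pvAdvance (pvPolice L) ((i : Int) - K) j < (pvPolice L).length
            · rw [dif_pos hj'lt, if_neg]
              rw [← List.getD_eq_getElem _ _ hj'lt]
              exact hnc hj'lt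
            · rw [dif_neg hj'lt]
          rw [hA, hB]
          exact ⟨rfl, hInvNew⟩

lemma pv_loop (K : Int) (L : List String) (hK : 0 ≤ K) :
    ∀ (d i : Nat), i + d = L.length → ∀ (l : List String) (j : Nat) (c : Int), pvInv K L i l j →
      ((PySem.List.pyRange (i : Int) (L.length : Int) 1).foldl (pvAStep K) (l, c)).2 =
      ((PySem.List.enumerate (L.drop i) (i : Int)).foldl (pvBStep K (pvPolice L)) (j, c)).2 := by
  intro d
  induction d with
  | zero =>
    intro i hd l j c _
    have h1 : PySem.List.pyRange (i : Int) (L.length : Int) 1 = [] :=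
      PySem.List.pyRange_one_eq_nil (by omega)
    have h2 : L.drop i = [] := List.drop_eq_nil_of_le (by omega)
    rw [h1, h2, PySem.List.enumerate_nil]
    simp
  | succ d ih =>
    intro i hd l j c hInv
    have hi : i < L.length := by omega
    have h1 : PySem.List.pyRange (i : Int) (L.length : Int) 1 =
        (i : Int) :: PySem.List.pyRange ((i : Int) + 1) (L.length : Int) 1 :=
      PySem.List.pyRange_one_cons (by omega)
    have h2 : L.drop i = L[i] :: L.drop (i + 1) := List.drop_eq_getElem_cons hi
    rw [h1, h2, PySem.List.enumerate_cons]
    simp only [List.foldl_cons]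
    obtain ⟨hc, hInv'⟩ := pv_step K L hK i hi l j c hInv
    have e2 : pvBStep K (pvPolice L) (j, c) ((i : Int), L[i]) =
        ((pvBStep K (pvPolice L) (j, c) ((i : Int), L[i])).1, (pvAStep K (l, c) (i : Int)).2) := by
      rw [hc]
    have hcast : (i : Int) + 1 = ((i + 1 : Nat) : Int) := by push_cast; ring
    rw [e2, hcast]
    exact ih (i + 1) (by omega) _ _ _ hInv' 

lemma pv_equiv_nonneg (K : Int) (L : List String) (hK : 0 ≤ K) :
    policemen_thieves K L = policemen_thieves_alt K L := by
  unfold policemen_thieves policemen_thieves_alt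
  have h0 : pvInv K L 0 L 0 := by
    refine ⟨rfl, fun q _ => Or.inl rfl, Nat.zero_le _, ?_, ?_⟩
    · intro m hm _
      exact (pvPolice_elem L m hm).2.2
    · intro m _ h
      exact absurd h (Nat.not_lt_zero m)
  have := pv_loop K L hK L.length 0 (by omega) L 0 0 h0
  simpa using this

lemma pv_foldl_snd_const {α β : Type} (f : (β × Int) → α → (β × Int))
    (h : ∀ s x, (f s x).2 = s.2) : ∀ (xs : List α) (s : β × Int), (xs.foldl f s).2 = s.2 := by
  intro xs
  induction xs with
  | nil => intro s; rfl
  | cons a t ih => intro s; rw [List.foldl_cons, ih, h]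

lemma pv_bstep_snd (K : Int) (ps : List Int) (hK : K < 0) (s : Nat × Int) (ix : Int × String) :
    (pvBStep K ps s ix).2 = s.2 := by
  simp only [pvBStep]
  by_cases hT : (ix.2 == "T") = true
  · rw [if_pos hT]
    by_cases hlt : pvAdvance ps (ix.1 - K) s.1 < ps.length
    · rw [dif_pos hlt, if_neg]
      by_cases hs : s.1 ≤ ps.length
      · obtain ⟨_, _, _, hj4⟩ := pvAdvance_spec ps (ix.1 - K) s.1 hs
        have := hj4 hlt
        rw [← List.getD_eq_getElem ps 0 hlt]
        omega
      · have hfix : pvAdvance ps (ix.1 - K) s.1 = s.1 := by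
          unfold pvAdvance
          have h0 : ps.length - s.1 = 0 := by omega
          rw [h0]
          rfl
        rw [hfix] at hlt
        omega
    · rw [dif_neg hlt]
  · rw [if_neg hT]

lemma pv_alt_neg (K : Int) (L : List String) (hK : K < 0) : policemen_thieves_alt K L = 0 := by
  unfold policemen_thieves_alt
  exact pv_foldl_snd_const _ (fun s x => pv_bstep_snd K (pvPolice L) hK s x) _ _

lemma pv_foldl_fixed {α β : Type} (f : β → α → β) (s : β) :
    ∀ (xs : List α), (∀ x ∈ xs, f s x = s) → xs.foldl f s = s := by
  intro xs
  induction xs with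
  | nil => intro _; rfl
  | cons a t ih =>
    intro h
    rw [List.foldl_cons, h a (List.mem_cons_self ..)]
    exact ih (fun x hx => h x (List.mem_cons_of_mem a hx))

-- A's step does nothing for K < 0 when no thief/policeman pair sits in the wrapped-around window
lemma pv_astep_neg (K : Int) (L : List String) (hK : K < 0) (c : Int)
    (hnp : ∀ (i p : Nat), i < L.length → p < L.length → L.getD i "" = "T" → L.getD p "" = "P" →
      (i : Int) < -K - 1 → i < p → ((p : Nat) : Int) < (L.length : Int) + (i : Int) + K + 1 → False)
    (x : Int) (hx0 : 0 ≤ x) (hxn : x < (L.length : Int)) :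
    pvAStep K (L, c) x = (L, c) := by
  simp only [pvAStep]
  by_cases hg : (PySem.List.pyGetD L x "" == "T" && L.contains "P") = true
  case neg =>
    rw [if_neg hg]
  case pos =>
    rw [if_pos hg]
    have hgT : L.getD x.toNat "" = "T" := by
      rw [Bool.and_eq_true, beq_iff_eq] at hg
      rw [← hg.1, PySem.List.pyGetD_eq_getElem L "" hx0 hxn,
        List.getD_eq_getElem _ _ (by omega)]
    have hfront0 : PySem.List.clampIdx L.length x - ((x - K).toNat) = 0 := by
      simp only [PySem.List.clampIdx]
      split_ifs <;> omega
    have hfront : (if x - K ≥ 0 then PySem.List.slice L (some (x - K)) (some x)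
        else PySem.List.slice L (some 0) (some x)) = ([] : List String) := by
      rw [if_pos (by omega : x - K ≥ 0), pv_slice_eq L _ _ (by omega), hfront0, List.take_zero]
    rw [hfront]
    rw [if_neg (by decide : ¬ ([] : List String).contains "P" = true)]
    have hbc : x + K + 1 ≤ (L.length : Int) := by omega
    rw [if_pos hbc]
    rw [if_neg]
    intro hcontra
    rw [pv_slice_eq L _ _ (by omega)] at hcontra
    obtain ⟨q, hq, hq1, hq2, hqP⟩ := (pv_mem_take_drop L _ _ "P").1 hcontra
    have hcl := pv_clampIdx_cast L.length (x + K + 1)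
    by_cases hneg : x + K + 1 < 0
    · rw [if_pos hneg] at hcl
      exact hnp x.toNat q (by omega) hq hgT hqP (by omega) (by omega) (by omega)
    · rw [if_neg hneg] at hcl
      omega

lemma pv_a_neg (K : Int) (L : List String) (hK : K < 0)
    (hnp : ∀ (i p : Nat), i < L.length → p < L.length → L.getD i "" = "T" → L.getD p "" = "P" →
      (i : Int) < -K - 1 → i < p → ((p : Nat) : Int) < (L.length : Int) + (i : Int) + K + 1 → False) :
    policemen_thieves K L = 0 := by
  unfold policemen_thieves
  rw [pv_foldl_fixed]
  intro x hx
  have := (PySem.List.mem_pyRange_one).1 hx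
  exact pv_astep_neg K L hK 0 hnp x this.1 this.2

lemma pv_D_nonpair (K : Int) (L : List String) (hnD : ¬ D_policemen_thieves K L) (hK : K < 0) :
    ∀ (i p : Nat), i < L.length → p < L.length → L.getD i "" = "T" → L.getD p "" = "P" →
      (i : Int) < -K - 1 → i < p → ((p : Nat) : Int) < (L.length : Int) + (i : Int) + K + 1 → False := by
  intro i p hi hp hiT hpP h1 h2 h3
  apply hnD
  refine ⟨hK, ⟨i, hi⟩, ⟨p, hp⟩, ?_, ?_, by simpa using h1, by simpa using h2, by simpa using h3⟩
  · show L[i] = "T"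
    rw [← List.getD_eq_getElem _ _ hi]; exact hiT
  · show L[p] = "P"
    rw [← List.getD_eq_getElem _ _ hp]; exact hpP

lemma pv_astep_mono (K : Int) (s : List String × Int) (x : Int) : s.2 ≤ (pvAStep K s x).2 := by
  simp only [pvAStep]
  split_ifs <;> simp

lemma pv_foldl_mono {α β : Type} (f : (β × Int) → α → (β × Int)) (h : ∀ s x, s.2 ≤ (f s x).2) :
    ∀ (xs : List α) (s : β × Int), s.2 ≤ (xs.foldl f s).2 := by
  intro xs
  induction xs with
  | nil => intro s; exact le_refl _
  | cons a t ih => intro s; exact le_trans (h s a) (ih (f s a))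

lemma pv_astep_eq_of_snd (K : Int) (s : List String × Int) (x : Int)
    (h : (pvAStep K s x).2 = s.2) : pvAStep K s x = s := by
  simp only [pvAStep] at h ⊢
  split_ifs at h ⊢ <;> simp_all

lemma pv_foldl_fix (K : Int) :
    ∀ (xs : List Int) (s : List String × Int), (xs.foldl (pvAStep K) s).2 = s.2 →
      xs.foldl (pvAStep K) s = s := by
  intro xs
  induction xs with
  | nil => intro s _; rfl
  | cons a t ih =>
    intro s h
    rw [List.foldl_cons] at h ⊢
    have h1 : s.2 ≤ (pvAStep K s a).2 := pv_astep_mono K s a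
    have h2 : (pvAStep K s a).2 ≤ (t.foldl (pvAStep K) (pvAStep K s a)).2 :=
      pv_foldl_mono (pvAStep K) (pv_astep_mono K) t _
    have h3 : pvAStep K s a = s := pv_astep_eq_of_snd K s a (by omega)
    rw [h3] at h ⊢
    exact ih s h

-- inside D_, A's accidental wrapped-around window does catch at the first affected thief
lemma pv_astep_catch_neg (K : Int) (L : List String) (hK : K < 0) (i p : Nat)
    (hi : i < L.length) (hp : p < L.length) (hiT : L.getD i "" = "T") (hpP : L.getD p "" = "P")
    (h1 : (i : Int) < -K - 1) (h2 : i < p) (h3 : (p : Int) < (L.length : Int) + (i : Int) + K + 1) :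
    (pvAStep K (L, 0) (i : Int)).2 = 1 := by
  simp only [pvAStep]
  rw [if_pos]
  case hc =>
    rw [Bool.and_eq_true, beq_iff_eq, PySem.List.pyGetD_natCast, List.contains_iff_mem]
    refine ⟨hiT, List.mem_iff_getElem.2 ⟨p, hp, ?_⟩⟩
    rw [← List.getD_eq_getElem _ _ hp]; exact hpP
  have hfront0 : PySem.List.clampIdx L.length (i : Int) - (((i : Int) - K).toNat) = 0 := by
    simp only [PySem.List.clampIdx]
    split_ifs <;> omega
  rw [if_pos (by omega : (i : Int) - K ≥ 0), pv_slice_eq L _ _ (by omega), hfront0, List.take_zero]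
  rw [if_neg (by decide : ¬ ([] : List String).contains "P" = true)]
  rw [if_pos (by omega : (i : Int) + K + 1 ≤ (L.length : Int))]
  have hcond : ((L.drop ((i : Int) + 1).toNat).take
      (PySem.List.clampIdx L.length ((i : Int) + K + 1) - ((i : Int) + 1).toNat)).contains "P" = true := by
    apply (pv_mem_take_drop L _ _ "P").2
    have hcl := pv_clampIdx_cast L.length ((i : Int) + K + 1)
    rw [if_pos (by omega : (i : Int) + K + 1 < 0)] at hcl
    exact ⟨p, hp, by omega, by omega, hpP⟩
  rw [pv_slice_eq L _ _ (by omega), if_pos hcond]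
  norm_num

-- ===== VERDICT (by name: the statement is the Claim_ definition above) =====
theorem policemen_thieves_spec : Claim_unchanged_policemen_thieves := by
  intro K L _hDom
  unfold Spec_policemen_thieves
  intro hnD
  by_cases hK : 0 ≤ K
  · exact pv_equiv_nonneg K L hK
  · have hK' : K < 0 := by omega
    rw [pv_alt_neg K L hK', pv_a_neg K L hK' (pv_D_nonpair K L hnD hK')]

theorem policemen_thieves_changed : Claim_changed_policemen_thieves := by
  unfold Claim_changed_policemen_thieves; decide

theorem policemen_thieves_tight : Claim_exact_policemen_thieves := by
  intro K L _hDom hD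
  obtain ⟨hK, i, p, hiT, hpP, h1, h2, h3⟩ := hD
  rw [pv_alt_neg K L hK]
  intro hA0
  unfold policemen_thieves at hA0
  have hiT' : L.getD (i : Nat) "" = "T" := by
    rw [List.getD_eq_getElem _ _ i.isLt]; exact hiT
  have hpP' : L.getD (p : Nat) "" = "P" := by
    rw [List.getD_eq_getElem _ _ p.isLt]; exact hpP
  have hsplit : PySem.List.pyRange 0 (L.length : Int) 1 =
      PySem.List.pyRange 0 ((i : Nat) : Int) 1 ++
        (((i : Nat) : Int) :: PySem.List.pyRange (((i : Nat) : Int) + 1) (L.length : Int) 1) := by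
    rw [← PySem.List.pyRange_one_cons (by omega)]
    exact PySem.List.pyRange_one_append 0 ((i : Nat) : Int) (L.length : Int) (by omega) (by omega)
  rw [hsplit, List.foldl_append, List.foldl_cons] at hA0
  have hpre0 : ((PySem.List.pyRange 0 ((i : Nat) : Int) 1).foldl (pvAStep K) (L, 0)).2 = 0 := by
    have ha : (0 : Int) ≤ ((PySem.List.pyRange 0 ((i : Nat) : Int) 1).foldl (pvAStep K) (L, 0)).2 :=
      pv_foldl_mono (pvAStep K) (pv_astep_mono K) _ (L, 0)
    have hb := pv_foldl_mono (pvAStep K) (pv_astep_mono K)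
      (PySem.List.pyRange (((i : Nat) : Int) + 1) (L.length : Int) 1)
      (pvAStep K ((PySem.List.pyRange 0 ((i : Nat) : Int) 1).foldl (pvAStep K) (L, 0)) ((i : Nat) : Int))
    have hc := pv_astep_mono K ((PySem.List.pyRange 0 ((i : Nat) : Int) 1).foldl (pvAStep K) (L, 0))
      ((i : Nat) : Int)
    omega
  rw [pv_foldl_fix K _ _ hpre0] at hA0
  have hstep := pv_astep_catch_neg K L hK (i : Nat) (p : Nat) i.isLt p.isLt hiT' hpP'
    h1 h2 h3
  have hb := pv_foldl_mono (pvAStep K) (pv_astep_mono K)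
    (PySem.List.pyRange (((i : Nat) : Int) + 1) (L.length : Int) 1) (pvAStep K (L, 0) ((i : Nat) : Int))
  omega
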